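-- pv_equiv track=rewrite | github.com/rita01-F/Compiler | Lexer/Lexer.py | replace_literal
-- ===== SOURCE A (Python) =====
-- def replace_literal(string):
--     array = string.split("'")
--     output = "'"
--     for i, el in enumerate(array):
--         if i % 2 == 0:
--             buf = ""
--             for v in el:
--                 if v == "#":
--                     if buf:
--                         output += chr(int(buf))
--                         buf = ""
--                 else:
--                     buf += v
--             if buf:
--                 output += chr(int(buf))
--         else:
--             output += el
--     return output + "'"
-- ===== SOURCE B (Python) =====
-- def replace_literal(string):
--     output = "'"
--     buf = ""
--     inside = False
--     for c in string:
--         if c == "'":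
--             if inside:
--                 inside = False
--             else:
--                 if buf:
--                     output += chr(int(buf))
--                     buf = ""
--                 inside = True
--         elif inside:
--             output += c
--         elif c == "#":
--             if buf:
--                 output += chr(int(buf))
--                 buf = ""
--         else:
--             buf += c
--     if not inside and buf:
--         output += chr(int(buf))
--     return output + "'"
-- ===== Notes on version B (the rewrite author's own statement) =====
-- stated objective: alternative
-- what changed: A splits the string on quotes and runs a two-level loop over the materialized segment list; B makes a single linear scan over the raw string, maintaining an inside-quote flag and a digit buffer flushed at '#', quote boundaries and end.
import Mathlib
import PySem

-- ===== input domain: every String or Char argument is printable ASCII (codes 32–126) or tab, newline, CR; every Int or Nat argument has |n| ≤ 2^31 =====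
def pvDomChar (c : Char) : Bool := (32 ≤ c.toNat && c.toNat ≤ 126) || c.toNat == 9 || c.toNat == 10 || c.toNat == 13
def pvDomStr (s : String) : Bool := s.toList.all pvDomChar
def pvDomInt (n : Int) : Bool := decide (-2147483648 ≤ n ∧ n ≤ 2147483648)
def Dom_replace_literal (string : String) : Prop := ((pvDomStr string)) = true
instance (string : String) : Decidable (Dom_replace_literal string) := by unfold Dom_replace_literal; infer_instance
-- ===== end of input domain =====

-- B replaces A's split-then-two-level-loop by a single linear scan with an inside/outside flag (alternative decomposition; return value proved equal).


-- shared primitive: chr(int(buf)); total stand-in (Pre_ admits exactly the inputs where Python's chr(int(buf)) succeeds with a Lean-representable Char)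
def pvChr (buf : List Char) : Char := Char.ofNat ((PySem.Int.ofChars? buf).getD 0).toNat

-- ===== PORT A =====
-- inner loop body of A ("for v in el"), state (output, buf)
def pvAstep (st : List Char × List Char) (v : Char) : List Char × List Char :=
  if v = '#' then (if st.2 ≠ [] then (st.1 ++ [pvChr st.2], ([] : List Char)) else st)
  else (st.1, st.2 ++ [v])

-- A's "if buf: output += chr(int(buf))" after the inner loop
def pvFlush (st : List Char × List Char) : List Char :=
  if st.2 ≠ [] then st.1 ++ [pvChr st.2] else st.1

-- outer loop body of A ("for i, el in enumerate(array)")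
def pvAseg (output : List Char) (eli : List Char × Nat) : List Char :=
  if eli.2 % 2 = 0 then pvFlush (eli.1.foldl pvAstep (output, [])) else output ++ eli.1

def replace_literal (string : String) : String :=
  String.mk ((PySem.Chars.splitOn string.toList ['\'']).zipIdx.foldl pvAseg ['\''] ++ ['\''])

-- ===== PORT B =====
-- single-pass loop body, state (output, buf, inside)
def pvBstep (st : List Char × List Char × Bool) (c : Char) : List Char × List Char × Bool :=
  if c = '\'' then
    if st.2.2 then (st.1, st.2.1, false)
    else ((if st.2.1 ≠ [] then st.1 ++ [pvChr st.2.1] else st.1), [], true)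
  else if st.2.2 then (st.1 ++ [c], st.2.1, true)
  else if c = '#' then (if st.2.1 ≠ [] then (st.1 ++ [pvChr st.2.1], [], false) else st)
  else (st.1, st.2.1 ++ [c], false)

-- B's final "if not inside and buf: output += chr(int(buf))"
def pvBfin (st : List Char × List Char × Bool) : List Char :=
  if st.2.2 = false ∧ st.2.1 ≠ [] then st.1 ++ [pvChr st.2.1] else st.1

def replace_literal_alt (string : String) : String :=
  String.mk (pvBfin (string.toList.foldl pvBstep (['\''], [], false)) ++ ['\''])

-- ===== PRECONDITION & SPEC =====
-- the '#'-separated nonempty buffers of the even (outside-quote) segments — exactly the strings A feeds to chr(int(.))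
def pvBufs (cs : List Char) : List (List Char) :=
  (((PySem.Chars.splitOn cs ['\'']).zipIdx.filter (fun p => p.2 % 2 = 0)).map (·.1)).flatMap
    (fun seg => (PySem.Chars.splitOn seg ['#']).filter (fun b => !b.isEmpty))

-- Pre_ excludes exactly the inputs where Python A raises (int(buf) ValueError, chr out of range) or where
-- chr yields a lone surrogate (a Python str value not representable as a Lean Char/String).
def Pre_replace_literal (string : String) : Prop :=
  (pvBufs string.toList).all (fun b =>
    match PySem.Int.ofChars? b with
    | some n => decide (0 ≤ n ∧ n < 1114112 ∧ ¬(55296 ≤ n ∧ n ≤ 57343))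
    | none => false) = true

instance (string : String) : Decidable (Pre_replace_literal string) := by
  unfold Pre_replace_literal; infer_instance

def pvWitness_replace_literal : String := "65#66'x'"

def Spec_replace_literal (string : String) (out : String) : Prop := out = replace_literal_alt string
instance (string : String) (out : String) : Decidable (Spec_replace_literal string out) := by unfold Spec_replace_literal; infer_instance

-- ===== CLAIM (what is proved, stated in full; the proofs are below) =====
def Claim_equal_replace_literal : Prop := ∀ (string : String), Dom_replace_literal string → Pre_replace_literal string → Spec_replace_literal string (replace_literal string)

-- ===== LEMMAS AND PROOFS =====

-- simple structural recursion computing split-on-one-char (proof-side model of PySem.Chars.splitOn _ [q])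
def pvSplitQ (q : Char) : List Char → List (List Char)
  | [] => [[]]
  | c :: cs =>
    if c = q then [] :: pvSplitQ q cs
    else
      match pvSplitQ q cs with
      | [] => [[c]]
      | h :: t => (c :: h) :: t

theorem pvSplitQ_ne_nil (q : Char) (cs : List Char) : pvSplitQ q cs ≠ [] := by
  cases cs with
  | nil => simp [pvSplitQ]
  | cons c cs =>
    simp only [pvSplitQ]
    split
    · simp
    · split <;> simp

theorem splitOn_go_eq (q : Char) :
    ∀ (cs : List Char) (fuel : Nat) (cur : List Char) (acc : List (List Char)),
      cs.length ≤ fuel →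
      PySem.Chars.splitOn.go [q] fuel cs cur acc
        = acc.reverse ++ (pvSplitQ q cs).modifyHead (cur.reverse ++ ·) := by
  intro cs
  induction cs with
  | nil =>
    intro fuel cur acc _
    cases fuel <;> simp [PySem.Chars.splitOn.go, pvSplitQ]
  | cons c rest ih =>
    intro fuel cur acc hle
    cases fuel with
    | zero => simp at hle
    | succ f =>
      have hle' : rest.length ≤ f := by simp at hle; omega
      by_cases hc : c = q
      · subst hc
        have hpre : [c].isPrefixOf (c :: rest) = true := by simp [List.isPrefixOf]
        simp only [PySem.Chars.splitOn.go, hpre, if_true, List.length_cons, List.length_nil,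
          List.drop_succ_cons, List.drop_zero]
        rw [ih f [] (cur.reverse :: acc) hle']
        cases hS : pvSplitQ c rest <;> simp_all [pvSplitQ, List.modifyHead]
      · have hpre : [q].isPrefixOf (c :: rest) = false := by
          simp [List.isPrefixOf]
          exact fun h => absurd h.symm hc
        simp only [PySem.Chars.splitOn.go, hpre, Bool.false_eq_true, if_false]
        rw [ih f (c :: cur) acc hle']
        simp only [pvSplitQ, hc, if_false]
        rcases h : pvSplitQ q rest with _ | ⟨hd, tl⟩
        · exact absurd h (pvSplitQ_ne_nil q rest)
        · simp [List.modifyHead]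

theorem splitOn_eq (q : Char) (cs : List Char) :
    PySem.Chars.splitOn cs [q] = pvSplitQ q cs := by
  unfold PySem.Chars.splitOn
  rw [splitOn_go_eq q cs (cs.length + 1) [] [] (by omega)]
  cases hS : pvSplitQ q cs
  · exact absurd hS (pvSplitQ_ne_nil q cs)
  · simp [List.modifyHead]

-- the common denominator of both ports: process the segments of the split, alternating outside/inside
def pvProc : Bool → List Char → List Char → List (List Char) → List Char
  | _, out, _, [] => out
  | true, out, buf, seg :: rest =>
    match rest with
    | [] => out ++ seg
    | _ :: _ => pvProc false (out ++ seg) buf rest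
  | false, out, buf, seg :: rest =>
    match rest with
    | [] => pvFlush (seg.foldl pvAstep (out, buf))
    | _ :: _ => pvProc true (pvFlush (seg.foldl pvAstep (out, buf))) [] rest

theorem bstep_quote (out buf : List Char) (inside : Bool) :
    pvBstep (out, buf, inside) '\'' =
      if inside then (out, buf, false)
      else ((if buf ≠ [] then out ++ [pvChr buf] else out), [], true) := by
  cases inside <;> simp [pvBstep]

theorem bstep_other_true (c : Char) (hc : c ≠ '\'') (out buf : List Char) :
    pvBstep (out, buf, true) c = (out ++ [c], buf, true) := by
  simp [pvBstep, hc]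

theorem bstep_other_false (c : Char) (hc : c ≠ '\'') (out buf : List Char) :
    pvBstep (out, buf, false) c = ((pvAstep (out, buf) c).1, (pvAstep (out, buf) c).2, false) := by
  by_cases h : c = '#'
  · subst h
    simp only [pvBstep, pvAstep, if_neg hc]
    split
    · simp_all
    · split
      · split <;> simp_all
      · simp
  · simp [pvBstep, pvAstep, hc, h]

theorem B_eq (cs : List Char) :
    ∀ (inside : Bool) (out buf : List Char),
      pvBfin (cs.foldl pvBstep (out, buf, inside)) = pvProc inside out buf (pvSplitQ '\'' cs) := by
  induction cs with
  | nil =>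
    intro inside out buf
    cases inside <;> simp [pvBfin, pvProc, pvFlush, pvSplitQ]
  | cons c rest ih =>
    intro inside out buf
    by_cases hc : c = '\''
    · subst hc
      rcases h : pvSplitQ '\'' rest with _ | ⟨hd, tl⟩
      · exact absurd h (pvSplitQ_ne_nil _ rest)
      · cases inside with
        | true =>
          rw [List.foldl_cons, bstep_quote, if_pos rfl, ih false out buf]
          simp [pvSplitQ, h, pvProc]
        | false =>
          rw [List.foldl_cons, bstep_quote, if_neg (by simp),
            ih true (if buf ≠ [] then out ++ [pvChr buf] else out) []]
          simp [pvSplitQ, h, pvProc, pvFlush]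
    · rcases h : pvSplitQ '\'' rest with _ | ⟨hd, tl⟩
      · exact absurd h (pvSplitQ_ne_nil _ rest)
      · cases inside with
        | true =>
          rw [List.foldl_cons, bstep_other_true c hc, ih true (out ++ [c]) buf]
          simp only [pvSplitQ, if_neg hc, h, pvProc]
          cases tl <;> simp [pvProc]
        | false =>
          rw [List.foldl_cons, bstep_other_false c hc,
            ih false (pvAstep (out, buf) c).1 (pvAstep (out, buf) c).2]
          simp only [pvSplitQ, if_neg hc, h, pvProc, List.foldl_cons]

theorem A_eq :
    ∀ (segs : List (List Char)) (n : Nat) (out : List Char), segs ≠ [] →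
      (segs.zipIdx n).foldl pvAseg out = pvProc (n % 2 == 1) out [] segs := by
  intro segs
  induction segs with
  | nil => intro n out h; exact absurd rfl h
  | cons seg rest ih =>
    intro n out _
    cases rest with
    | nil =>
      rcases Nat.mod_two_eq_zero_or_one n with h | h <;>
        simp [List.zipIdx_cons, pvAseg, pvProc, h]
    | cons s2 rest2 =>
      rw [List.zipIdx_cons, List.foldl_cons, ih (n + 1) (pvAseg out (seg, n)) (by simp)]
      rcases Nat.mod_two_eq_zero_or_one n with h | h
      · have h1 : (n + 1) % 2 = 1 := by omega
        simp [pvAseg, pvProc, h, h1]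
      · have h1 : (n + 1) % 2 = 0 := by omega
        simp [pvAseg, pvProc, h, h1]

-- ===== VERDICT (by name: the statement is the Claim_ definition above) =====
theorem replace_literal_spec : Claim_equal_replace_literal := by
  intro s _ _
  unfold Spec_replace_literal replace_literal replace_literal_alt
  rw [splitOn_eq, A_eq _ 0 ['\''] (pvSplitQ_ne_nil _ _), B_eq]
  simp
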